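-- pv_equiv track=rewrite | github.com/bcarpio/outcome-ops-ai-assist | lambda/process-pr-check/check_handlers/adr_compliance.py | extract_file_diff_from_full_diff
-- ===== SOURCE A (Python) =====
-- def extract_file_diff_from_full_diff(full_diff: str, file_path: str) -> str:
--     """Extract a specific file's diff section from the full PR diff."""
--     lines = full_diff.split("\n")
--
--     # Find the start of this file's diff
--     file_diff_lines = []
--     capturing = False
--
--     for i, line in enumerate(lines):
--         # Check if this is the start of our file's diff
--         if line.startswith("diff --git") and file_path in line:
--             capturing = True
--             file_diff_lines.append(line)
--         # Check if we've hit the next file's diff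
--         elif capturing and line.startswith("diff --git"):
--             break
--         # Capture lines for our file
--         elif capturing:
--             file_diff_lines.append(line)
--
--     return "\n".join(file_diff_lines) if file_diff_lines else ""
-- ===== SOURCE B (Python) =====
-- def extract_file_diff_from_full_diff(full_diff: str, file_path: str) -> str:
--     """Extract a specific file's diff section from the full PR diff."""
--     lines = full_diff.split("\n")
--     headers = [(i, line) for i, line in enumerate(lines)
--                if line.startswith("diff --git")]
--     for k, (i, line) in enumerate(headers):
--         if file_path in line:
--             end = headers[k + 1][0] if k + 1 < len(headers) else len(lines)
--             return "\n".join(lines[i:end])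
--     return ""
-- ===== Notes on version B (the rewrite author's own statement) =====
-- stated objective: alternative
-- what changed: Replaces A's single stateful capturing-flag scan with a boundary table of all 'diff --git' header lines: pick the first header containing file_path and slice the lines up to the next header (or end).
-- intended difference: When the first header matching file_path is followed by another 'diff --git' header that also contains file_path, A keeps capturing and returns several file sections merged together, while B returns only the first file's section, which is what extracting 'a specific file's diff section' intends. — e.g. on extract_file_diff_from_full_diff("diff --git a\nx\ndiff --git a\ny", "a"): A returns "diff --git a\nx\ndiff --git a\ny", B returns "diff --git a\nx"
import Mathlib
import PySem

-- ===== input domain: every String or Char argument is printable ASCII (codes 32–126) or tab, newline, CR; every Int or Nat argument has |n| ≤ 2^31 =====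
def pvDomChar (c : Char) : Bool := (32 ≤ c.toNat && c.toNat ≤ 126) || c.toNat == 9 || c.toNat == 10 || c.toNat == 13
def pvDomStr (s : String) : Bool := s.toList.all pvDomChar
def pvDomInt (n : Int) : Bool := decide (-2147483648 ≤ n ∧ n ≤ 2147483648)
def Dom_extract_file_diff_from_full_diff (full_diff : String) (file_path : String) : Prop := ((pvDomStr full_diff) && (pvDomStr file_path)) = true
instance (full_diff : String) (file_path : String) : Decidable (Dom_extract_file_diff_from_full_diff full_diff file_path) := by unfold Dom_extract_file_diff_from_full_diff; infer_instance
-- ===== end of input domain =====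

-- B replaces A's stateful capturing-flag scan by a header boundary table plus a slice (alternative decomposition, same cost).

-- ===== PORT A =====
-- the for-loop with its capturing flag; returning acc at the 'break' ends the whole loop
def pvALoop (file_path : String) : List String → List String → Bool → List String
  | [], acc, _ => acc
  | l :: rest, acc, capturing =>
    if PySem.Str.startswith l "diff --git" && PySem.Str.isIn file_path l then
      pvALoop file_path rest (acc ++ [l]) true
    else if capturing && PySem.Str.startswith l "diff --git" then
      acc
    else if capturing then
      pvALoop file_path rest (acc ++ [l]) capturing
    else
      pvALoop file_path rest acc capturing

def extract_file_diff_from_full_diff (full_diff : String) (file_path : String) : String :=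
  -- full_diff.split("\n"): the separator is non-empty, so split? is always `some`
  let lines := (PySem.Str.split? full_diff "\n").getD []
  let file_diff_lines := pvALoop file_path lines [] false
  if file_diff_lines.isEmpty then "" else PySem.Str.join "\n" file_diff_lines

-- ===== PORT B =====
-- the for-loop over the header table; 'headers[k+1]' is the head of the remaining headers
def pvBLoop (lines : List String) (file_path : String) : List (Int × String) → String
  | [] => ""
  | (i, line) :: rest =>
    if PySem.Str.isIn file_path line then
      let stop : Int :=
        match rest with
        | (j, _) :: _ => j
        | [] => PySem.List.len lines
      PySem.Str.join "\n" (PySem.List.slice lines (some i) (some stop))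
    else pvBLoop lines file_path rest

def extract_file_diff_from_full_diff_alt (full_diff : String) (file_path : String) : String :=
  let lines := (PySem.Str.split? full_diff "\n").getD []
  let headers := (PySem.List.enumerate lines).filter (fun p => PySem.Str.startswith p.2 "diff --git")
  pvBLoop lines file_path headers

-- ===== PRECONDITION & SPEC =====
-- When the first header matching file_path is followed by another 'diff --git' header that also
-- contains file_path, A keeps capturing and returns several file sections merged together, while B
-- returns only the first file's section, which is what extracting 'a specific file's diff' intends.
-- header line starting with "diff --git" whose text contains fp ("" contains-check makes it a plain header test)
def pvHM (fp l : String) : Bool := "diff --git".toList.isPrefixOf l.toList && decide (fp.toList <:+: l.toList)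

def D_extract_file_diff_from_full_diff (full_diff : String) (file_path : String) : Prop :=
  let hs := ((PySem.Str.split? full_diff "\n").getD []).filter (pvHM "")
  pvHM file_path hs[hs.findIdx (pvHM file_path) + 1]! = true
instance (full_diff : String) (file_path : String) : Decidable (D_extract_file_diff_from_full_diff full_diff file_path) := by unfold D_extract_file_diff_from_full_diff; infer_instance

def Spec_extract_file_diff_from_full_diff (full_diff : String) (file_path : String) (out : String) : Prop := ¬ D_extract_file_diff_from_full_diff full_diff file_path → out = extract_file_diff_from_full_diff_alt full_diff file_path
instance (full_diff : String) (file_path : String) (out : String) : Decidable (Spec_extract_file_diff_from_full_diff full_diff file_path out) := by unfold Spec_extract_file_diff_from_full_diff; infer_instance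

def pvDiffWitness_extract_file_diff_from_full_diff : String × String :=
  ("diff --git a\nx\ndiff --git a\ny", "a")
def pvDiffWitnessOut_extract_file_diff_from_full_diff : String × String :=
  ("diff --git a\nx\ndiff --git a\ny", "diff --git a\nx")

-- ===== CLAIM (what is proved, stated in full; the proofs are below) =====
def Claim_unchanged_extract_file_diff_from_full_diff : Prop := ∀ (full_diff : String) (file_path : String), Dom_extract_file_diff_from_full_diff full_diff file_path → Spec_extract_file_diff_from_full_diff full_diff file_path (extract_file_diff_from_full_diff full_diff file_path)
def Claim_changed_extract_file_diff_from_full_diff : Prop := Dom_extract_file_diff_from_full_diff (pvDiffWitness_extract_file_diff_from_full_diff.1) (pvDiffWitness_extract_file_diff_from_full_diff.2) ∧ D_extract_file_diff_from_full_diff (pvDiffWitness_extract_file_diff_from_full_diff.1) (pvDiffWitness_extract_file_diff_from_full_diff.2) ∧ extract_file_diff_from_full_diff (pvDiffWitness_extract_file_diff_from_full_diff.1) (pvDiffWitness_extract_file_diff_from_full_diff.2) = pvDiffWitnessOut_extract_file_diff_from_full_diff.1 ∧ extract_file_diff_from_full_diff_alt (pvDiffWitness_extract_file_diff_from_full_diff.1)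 (pvDiffWitness_extract_file_diff_from_full_diff.2) = pvDiffWitnessOut_extract_file_diff_from_full_diff.2 ∧ pvDiffWitnessOut_extract_file_diff_from_full_diff.1 ≠ pvDiffWitnessOut_extract_file_diff_from_full_diff.2

def Claim_exact_extract_file_diff_from_full_diff : Prop := ∀ (full_diff : String) (file_path : String), Dom_extract_file_diff_from_full_diff full_diff file_path → D_extract_file_diff_from_full_diff full_diff file_path → extract_file_diff_from_full_diff full_diff file_path ≠ extract_file_diff_from_full_diff_alt full_diff file_path

-- ===== LEMMAS AND PROOFS =====

-- header-line predicates: header / matching header / non-matching header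
def pvH (l : String) : Bool := PySem.Str.startswith l "diff --git"
def pvP (fp : String) (l : String) : Bool := PySem.Str.startswith l "diff --git" && PySem.Str.isIn fp l
def pvQ (fp : String) (l : String) : Bool := PySem.Str.startswith l "diff --git" && !PySem.Str.isIn fp l

-- first element satisfying P, with its index
def pvFirst (P : String → Bool) : List String → Option (Nat × String)
  | [] => none
  | x :: r => if P x then some (0, x) else (pvFirst P r).map (fun q => (q.1 + 1, q.2))

theorem pvALoop_capturing (fp : String) (ls : List String) : ∀ acc,
    pvALoop fp ls acc true = acc ++ ls.takeWhile (fun l => !pvQ fp l) := by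
  induction ls with
  | nil => intro acc; simp [pvALoop]
  | cons l r ih =>
    intro acc
    simp only [pvALoop, ih, List.takeWhile_cons, pvQ]
    set s := PySem.Str.startswith l "diff --git" with hs
    set m := PySem.Str.isIn fp l with hm
    cases s <;> cases m <;> simp

theorem pvALoop_scan (fp : String) (ls : List String) : ∀ acc,
    pvALoop fp ls acc false = acc ++
      (match pvFirst (pvP fp) ls with
       | none => []
       | some s => s.2 :: ((ls.drop (s.1 + 1)).takeWhile (fun l => !pvQ fp l))) := by
  induction ls with
  | nil => intro acc; simp [pvALoop, pvFirst]
  | cons l r ih =>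
    intro acc
    simp only [pvALoop, ih, pvALoop_capturing, pvFirst, pvP]
    split_ifs with h1 <;> try simp_all
    · cases hf : pvFirst (pvP fp) r <;> simp

theorem pvFirst_some (P : String → Bool) (ls : List String) :
    ∀ n l, pvFirst P ls = some (n, l) →
      P l = true ∧ n < ls.length ∧ ls.drop n = l :: ls.drop (n + 1) := by
  induction ls with
  | nil => intro n l h; simp [pvFirst] at h
  | cons x r ih =>
    intro n l h
    cases hx : P x with
    | true =>
      simp [pvFirst, hx] at h
      obtain ⟨hn, hl⟩ := h
      subst hn; subst hl
      simp [hx]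
    | false =>
      simp [pvFirst, hx] at h
      obtain ⟨a, ha, hn⟩ := h
      obtain ⟨hP, hlen, hdrop⟩ := ih a l ha
      subst hn
      refine ⟨hP, by simp; omega, by simpa using hdrop⟩

theorem pvFirst_some_take (P : String → Bool) (ls : List String) :
    ∀ n l, pvFirst P ls = some (n, l) → ∀ x ∈ ls.take n, P x = false := by
  induction ls with
  | nil => intro n l h; simp [pvFirst] at h
  | cons y r ih =>
    intro n l h x hx
    cases hy : P y with
    | true =>
      simp [pvFirst, hy] at h
      obtain ⟨hn, _⟩ := h
      subst hn
      simp at hx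
    | false =>
      simp [pvFirst, hy] at h
      obtain ⟨a, ha, hn⟩ := h
      subst hn
      simp [List.take_succ_cons] at hx
      rcases hx with hx | hx
      · subst hx; exact hy
      · exact ih a l ha x hx

theorem pvFirst_none_all (P : String → Bool) (ls : List String)
    (h : pvFirst P ls = none) : ∀ x ∈ ls, P x = false := by
  induction ls with
  | nil => simp
  | cons y r ih =>
    cases hy : P y with
    | true => simp [pvFirst, hy] at h
    | false =>
      simp [pvFirst, hy] at h
      intro x hx
      rcases List.mem_cons.mp hx with hx | hx
      · subst hx; exact hy
      · exact ih h x hx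

theorem pvFirst_none_takeWhile (P : String → Bool) (ls : List String)
    (h : pvFirst P ls = none) : ls.takeWhile (fun l => !P l) = ls := by
  induction ls with
  | nil => simp
  | cons x r ih =>
    cases hx : P x with
    | true => simp [pvFirst, hx] at h
    | false =>
      simp [pvFirst, hx] at h
      simp [hx, ih h]

theorem pvFirst_some_takeWhile (P : String → Bool) (ls : List String) :
    ∀ n l, pvFirst P ls = some (n, l) → ls.takeWhile (fun x => !P x) = ls.take n := by
  induction ls with
  | nil => intro n l h; simp [pvFirst] at h
  | cons x r ih =>
    intro n l h
    cases hx : P x with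
    | true =>
      simp [pvFirst, hx] at h
      obtain ⟨hn, _⟩ := h
      subst hn
      simp [hx]
    | false =>
      simp [pvFirst, hx] at h
      obtain ⟨a, ha, hn⟩ := h
      subst hn
      simp [hx, ih a l ha]

theorem pvFirst_mono (P Q : String → Bool) (ls : List String) :
    ∀ n l, pvFirst P ls = some (n, l) → (∀ x, P x = false → Q x = false) →
      Q l = true → pvFirst Q ls = some (n, l) := by
  induction ls with
  | nil => intro n l h; simp [pvFirst] at h
  | cons x r ih =>
    intro n l h himp hq
    cases hx : P x with
    | true =>
      simp [pvFirst, hx] at h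
      obtain ⟨hn, hl⟩ := h
      subst hn; subst hl
      simp [pvFirst, hq]
    | false =>
      simp [pvFirst, hx] at h
      obtain ⟨a, ha, hn⟩ := h
      subst hn
      simp [pvFirst, himp x hx, ih a l ha himp hq]

theorem pvHM_empty (x : String) : pvHM "" x = PySem.Str.startswith x "diff --git" := by
  rw [Bool.eq_iff_iff]
  simp [pvHM, PySem.Chars.startswith_iff, List.isPrefixOf_iff_prefix]

theorem pvHM_eq (fp x : String) : pvHM fp x = pvP fp x := by
  rw [Bool.eq_iff_iff]
  simp [pvHM, pvP, PySem.Chars.startswith_iff, List.isPrefixOf_iff_prefix, PySem.Chars.isIn_iff_infix]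

theorem pvFindIdx_append (p : String → Bool) (l : String) (a b : List String)
    (h : ∀ x ∈ a, p x = false) (hl : p l = true) : (a ++ l :: b).findIdx p = a.length := by
  induction a with
  | nil => simp [List.findIdx_cons, hl]
  | cons x r ih =>
    have hx := h x (by simp)
    simp only [List.cons_append, List.findIdx_cons, hx, cond_false]
    rw [ih (fun y hy => h y (by simp [hy]))]
    simp

theorem pvBLoop_skip (lines : List String) (fp : String) (hs1 hs2 : List (Int × String))
    (h : ∀ p ∈ hs1, PySem.Str.isIn fp p.2 = false) :
    pvBLoop lines fp (hs1 ++ hs2) = pvBLoop lines fp hs2 := by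
  induction hs1 with
  | nil => simp
  | cons p r ih =>
    obtain ⟨i, line⟩ := p
    have hp := h (i, line) (by simp)
    simp only [List.cons_append, pvBLoop, hp, Bool.false_eq_true, if_false]
    exact ih (fun q hq => h q (by simp [hq]))

theorem pvMem_enumerate_snd (ls : List String) : ∀ (k : Int) (p : Int × String),
    p ∈ PySem.List.enumerate ls k → p.2 ∈ ls := by
  induction ls with
  | nil => intro k p h; simp [PySem.List.enumerate_nil] at h
  | cons x r ih =>
    intro k p h
    rw [PySem.List.enumerate_cons] at h
    rcases List.mem_cons.mp h with h | h
    · subst h; simp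
    · exact List.mem_cons_of_mem _ (ih (k + 1) p h)

-- main lemma, on the split line list
theorem pvMain (fp : String) (ls : List String)
    (hnd : pvHM fp (ls.filter (pvHM ""))[(ls.filter (pvHM "")).findIdx (pvHM fp) + 1]! = false) :
    (if (pvALoop fp ls [] false).isEmpty then "" else PySem.Str.join "\n" (pvALoop fp ls [] false)) =
    pvBLoop ls fp ((PySem.List.enumerate ls).filter (fun p => PySem.Str.startswith p.2 "diff --git")) := by
  rw [pvALoop_scan fp ls []]
  cases hf : pvFirst (pvP fp) ls with
  | none =>
    -- no matching header: A collects nothing, B's loop never fires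
    have hall := pvFirst_none_all (pvP fp) ls hf
    have hskip : ∀ p ∈ (PySem.List.enumerate ls).filter (fun p => PySem.Str.startswith p.2 "diff --git"),
        PySem.Str.isIn fp p.2 = false := by
      intro p hp
      have hmem := List.mem_of_mem_filter hp
      have hH := List.of_mem_filter hp
      have := hall p.2 (pvMem_enumerate_snd ls 0 p hmem)
      simp [pvP] at this
      simp at hH
      exact this hH
    conv_rhs => rw [← List.append_nil ((PySem.List.enumerate ls).filter (fun p => PySem.Str.startswith p.2 "diff --git"))]
    rw [pvBLoop_skip ls fp _ [] hskip]
    simp [pvBLoop]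
  | some s =>
    obtain ⟨n, l⟩ := s
    obtain ⟨hP, hn, hdrop⟩ := pvFirst_some (pvP fp) ls n l hf
    set d := ls.drop (n + 1) with hd
    -- split ls as take n ++ l :: d and split the header table accordingly
    have hsplit : ls = ls.take n ++ (l :: d) := by
      conv_lhs => rw [← List.take_append_drop n ls]
      rw [hdrop]
    have hlen_take : (ls.take n).length = n := by simp; omega
    have hheaders : (PySem.List.enumerate ls).filter (fun p => PySem.Str.startswith p.2 "diff --git") =
        ((PySem.List.enumerate (ls.take n)).filter (fun p => PySem.Str.startswith p.2 "diff --git")) ++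
        (((n : Int), l) :: ((PySem.List.enumerate d ((n : Int) + 1)).filter (fun p => PySem.Str.startswith p.2 "diff --git"))) := by
      conv_lhs => rw [hsplit]
      rw [show PySem.List.enumerate (ls.take n ++ (l :: d)) = PySem.List.enumerate (ls.take n ++ (l :: d)) 0 from rfl,
        PySem.List.enumerate_append, List.filter_append, hlen_take]
      have hHl : PySem.Str.startswith l "diff --git" = true := by
        simp [pvP] at hP; exact hP.1
      rw [PySem.List.enumerate_cons]
      simp only [List.filter_cons, hHl]
      norm_num
    rw [hheaders]
    have hskip1 : ∀ p ∈ (PySem.List.enumerate (ls.take n)).filter (fun p => PySem.Str.startswith p.2 "diff --git"),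
        PySem.Str.isIn fp p.2 = false := by
      intro p hp
      have hmem := List.mem_of_mem_filter hp
      have hH := List.of_mem_filter hp
      have hPx := pvFirst_some_take (pvP fp) ls n l hf p.2 (pvMem_enumerate_snd _ 0 p hmem)
      simp [pvP] at hPx
      simp at hH
      exact hPx hH
    rw [pvBLoop_skip ls fp _ _ hskip1]
    have hMl : PySem.Str.isIn fp l = true := by simp [pvP] at hP; exact hP.2
    simp only [pvBLoop, hMl, if_true]
    cases hfH : pvFirst (fun x => PySem.Str.startswith x "diff --git") d with
    | none =>
      -- no further header: B slices to the end, A takes all of d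
      have hfilter_nil : (PySem.List.enumerate d ((n : Int) + 1)).filter (fun p => PySem.Str.startswith p.2 "diff --git") = [] := by
        rw [List.filter_eq_nil_iff]
        intro p hp
        have := pvFirst_none_all _ d hfH p.2 (pvMem_enumerate_snd d _ p hp)
        simpa using this
      rw [hfilter_nil]
      have hQnone : pvFirst (pvQ fp) d = none := by
        cases hq : pvFirst (pvQ fp) d with
        | none => rfl
        | some q =>
          obtain ⟨m, x⟩ := q
          obtain ⟨hQx, _, _⟩ := pvFirst_some (pvQ fp) d m x hq
          have := pvFirst_none_all _ d hfH x
          have hxmem : x ∈ d := by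
            obtain ⟨_, hm, hdx⟩ := pvFirst_some (pvQ fp) d m x hq
            have : x ∈ d.drop m := by rw [hdx]; simp
            exact List.mem_of_mem_drop this
          have hH := this hxmem
          simp only [pvQ, hH, Bool.false_and] at hQx
          cases hQx
      have htake : d.takeWhile (fun x => !pvQ fp x) = d := pvFirst_none_takeWhile (pvQ fp) d hQnone
      have hslice : PySem.List.slice ls (some ((n : Nat) : Int)) (some (PySem.List.len ls)) = ls.drop n := by
        have he : PySem.List.len ls = ((ls.length : Nat) : Int) := by simp [PySem.List.len_eq]
        rw [he, PySem.List.slice_natCast]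
        apply List.take_of_length_le
        simp
      simp only [hslice, hdrop, ← hd, htake]
      simp
    | some q =>
      obtain ⟨m, hl2⟩ := q
      obtain ⟨hHh, hmlen, hddrop⟩ := pvFirst_some _ d m hl2 hfH
      -- the first later header does not mention fp: that is exactly what ¬D says here
      have hBsome : (d.filter (pvHM ""))[0]? = some hl2 := by
        have hdsplit0 : d = d.take m ++ (hl2 :: d.drop (m + 1)) := by
          conv_lhs => rw [← List.take_append_drop m d]
          rw [hddrop]
        have hnilf : (d.take m).filter (pvHM "") = [] := by
          rw [List.filter_eq_nil_iff]
          intro x hx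
          have := pvFirst_some_take _ d m hl2 hfH x hx
          simp only at this
          rw [pvHM_empty, this]
          simp
        conv_lhs => rw [hdsplit0]
        rw [List.filter_append, hnilf, List.nil_append, List.filter_cons]
        rw [pvHM_empty hl2, hHh]
        simp
      have hAfalse : ∀ x ∈ (ls.take n).filter (pvHM ""), pvHM fp x = false := by
        intro x hx
        rw [pvHM_eq]
        exact pvFirst_some_take (pvP fp) ls n l hf x (List.mem_of_mem_filter hx)
      have hsplit2 : ls.filter (pvHM "") = (ls.take n).filter (pvHM "") ++ l :: d.filter (pvHM "") := by
        conv_lhs => rw [hsplit]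
        rw [List.filter_append, List.filter_cons]
        have : pvHM "" l = true := by
          rw [pvHM_empty]
          simp only [pvP, Bool.and_eq_true] at hP
          exact hP.1
        rw [this]
        simp
      have hMl' : pvHM fp l = true := by rw [pvHM_eq]; exact hP
      have hidx : (ls.filter (pvHM "")).findIdx (pvHM fp) = ((ls.take n).filter (pvHM "")).length := by
        rw [hsplit2]
        exact pvFindIdx_append _ l _ _ hAfalse hMl'
      have hMh : PySem.Str.isIn fp hl2 = false := by
        rw [getElem!_def, hidx, hsplit2, List.getElem?_append_right (by omega)] at hnd
        simp only [Nat.add_sub_cancel_left, List.getElem?_cons_succ] at hnd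
        rw [hBsome] at hnd
        rw [pvHM_eq] at hnd
        simp only [pvP, hHh, Bool.true_and] at hnd
        exact hnd
      -- the remaining header table starts with ((n+1+m), hl2)
      have hdsplit : d = d.take m ++ (hl2 :: d.drop (m + 1)) := by
        conv_lhs => rw [← List.take_append_drop m d]
        rw [hddrop]
      have hlen_take2 : (d.take m).length = m := by simp; omega
      have hfilter2 : (PySem.List.enumerate d ((n : Int) + 1)).filter (fun p => PySem.Str.startswith p.2 "diff --git") =
          (((n : Int) + 1 + (m : Int)), hl2) :: ((PySem.List.enumerate (d.drop (m + 1)) ((n : Int) + 1 + (m : Int) + 1)).filter (fun p => PySem.Str.startswith p.2 "diff --git")) := by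
        conv_lhs => rw [hdsplit]
        rw [PySem.List.enumerate_append, List.filter_append, hlen_take2]
        have h1 : (PySem.List.enumerate (d.take m) ((n : Int) + 1)).filter (fun p => PySem.Str.startswith p.2 "diff --git") = [] := by
          rw [List.filter_eq_nil_iff]
          intro p hp
          have := pvFirst_some_take _ d m hl2 hfH p.2 (pvMem_enumerate_snd _ _ p hp)
          simpa using this
        rw [h1, PySem.List.enumerate_cons]
        simp only [List.filter_cons, hHh, List.nil_append]
        norm_num
      rw [hfilter2]
      -- A takes exactly up to that header
      have hQfirst : pvFirst (pvQ fp) d = some (m, hl2) := by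
        apply pvFirst_mono _ _ d m hl2 hfH
        · intro x hx; simp only [pvQ, hx, Bool.false_and]
        · simp only [pvQ, hHh, hMh, Bool.true_and, Bool.not_false]
      have htake : d.takeWhile (fun x => !pvQ fp x) = d.take m :=
        pvFirst_some_takeWhile (pvQ fp) d m hl2 hQfirst
      have hslice : PySem.List.slice ls (some ((n : Nat) : Int)) (some ((n : Int) + 1 + (m : Int))) =
          (ls.drop n).take (1 + m) := by
        have he : ((n : Int) + 1 + (m : Int)) = (((n + 1 + m : Nat)) : Int) := by push_cast; ring
        rw [he, PySem.List.slice_natCast]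
        congr 1
        omega
      simp only [hslice, hdrop, ← hd]
      have : (l :: d).take (1 + m) = l :: d.take m := by
        rw [Nat.add_comm 1 m]
        simp [List.take_succ_cons]
      rw [this, htake]
      simp

theorem pvFindIdx_all (p : String → Bool) (xs : List String) (h : ∀ x ∈ xs, p x = false) :
    xs.findIdx p = xs.length := by
  induction xs with
  | nil => simp
  | cons x r ih =>
    simp [List.findIdx_cons, h x (by simp), ih (fun y hy => h y (by simp [hy]))]

theorem pvHM_empty_str (fp : String) : pvHM fp "" = false := by
  have hpre : ("diff --git".toList.isPrefixOf ("" : String).toList) = false := by decide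
  simp only [pvHM, hpre, Bool.false_and]

theorem pvTakeWhile_frontier (p : String → Bool) (y : String) (b : List String) :
    ∀ a : List String, (∀ x ∈ a, p x = true) → p y = true →
      (a ++ y :: b).takeWhile p = a ++ y :: b.takeWhile p := by
  intro a
  induction a with
  | nil => intro _ hy; simp [hy]
  | cons x r ih =>
    intro h hy
    have hx := h x (by simp)
    simp [hx, ih (fun z hz => h z (by simp [hz])) hy]

theorem pvJoinLen (sep : List Char) : ∀ (r : List (List Char)) (a : List Char),
    (PySem.Chars.join sep (a :: r)).length = a.length + (r.map List.length).sum + r.length * sep.length := by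
  intro r
  induction r with
  | nil => intro a; rw [PySem.Chars.join_singleton]; simp
  | cons b t ih =>
    intro a
    rw [PySem.Chars.join_cons_cons]
    simp only [List.length_append, ih b, List.map_cons, List.sum_cons, List.length_cons]
    ring

-- inside D the extra absorbed header makes A's result strictly longer than B's
theorem pvMainTight (fp : String) (ls : List String)
    (hD : pvHM fp (ls.filter (pvHM ""))[(ls.filter (pvHM "")).findIdx (pvHM fp) + 1]! = true) :
    (if (pvALoop fp ls [] false).isEmpty then "" else PySem.Str.join "\n" (pvALoop fp ls [] false)) ≠
    pvBLoop ls fp ((PySem.List.enumerate ls).filter (fun p => PySem.Str.startswith p.2 "diff --git")) := by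
  rw [pvALoop_scan fp ls []]
  cases hf : pvFirst (pvP fp) ls with
  | none =>
    exfalso
    have hall := pvFirst_none_all (pvP fp) ls hf
    have hallhs : ∀ x ∈ ls.filter (pvHM ""), pvHM fp x = false := by
      intro x hx
      rw [pvHM_eq]
      exact hall x (List.mem_of_mem_filter hx)
    rw [getElem!_def, pvFindIdx_all _ _ hallhs, List.getElem?_eq_none (by omega)] at hD
    have hD' : pvHM fp "" = true := hD
    rw [pvHM_empty_str] at hD'
    cases hD'
  | some s =>
    obtain ⟨n, l⟩ := s
    obtain ⟨hP, hn, hdrop⟩ := pvFirst_some (pvP fp) ls n l hf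
    set d := ls.drop (n + 1) with hd
    have hsplit : ls = ls.take n ++ (l :: d) := by
      conv_lhs => rw [← List.take_append_drop n ls]
      rw [hdrop]
    have hlen_take : (ls.take n).length = n := by simp; omega
    have hheaders : (PySem.List.enumerate ls).filter (fun p => PySem.Str.startswith p.2 "diff --git") =
        ((PySem.List.enumerate (ls.take n)).filter (fun p => PySem.Str.startswith p.2 "diff --git")) ++
        (((n : Int), l) :: ((PySem.List.enumerate d ((n : Int) + 1)).filter (fun p => PySem.Str.startswith p.2 "diff --git"))) := by
      conv_lhs => rw [hsplit]
      rw [show PySem.List.enumerate (ls.take n ++ (l :: d)) = PySem.List.enumerate (ls.take n ++ (l :: d)) 0 from rfl,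
        PySem.List.enumerate_append, List.filter_append, hlen_take]
      have hHl : PySem.Str.startswith l "diff --git" = true := by
        simp [pvP] at hP; exact hP.1
      rw [PySem.List.enumerate_cons]
      simp only [List.filter_cons, hHl]
      norm_num
    rw [hheaders]
    have hskip1 : ∀ p ∈ (PySem.List.enumerate (ls.take n)).filter (fun p => PySem.Str.startswith p.2 "diff --git"),
        PySem.Str.isIn fp p.2 = false := by
      intro p hp
      have hmem := List.mem_of_mem_filter hp
      have hH := List.of_mem_filter hp
      have hPx := pvFirst_some_take (pvP fp) ls n l hf p.2 (pvMem_enumerate_snd _ 0 p hmem)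
      simp [pvP] at hPx
      simp at hH
      exact hPx hH
    rw [pvBLoop_skip ls fp _ _ hskip1]
    have hMl : PySem.Str.isIn fp l = true := by simp [pvP] at hP; exact hP.2
    simp only [pvBLoop, hMl, if_true]
    have hAfalse : ∀ x ∈ (ls.take n).filter (pvHM ""), pvHM fp x = false := by
      intro x hx
      rw [pvHM_eq]
      exact pvFirst_some_take (pvP fp) ls n l hf x (List.mem_of_mem_filter hx)
    have hsplit2 : ls.filter (pvHM "") = (ls.take n).filter (pvHM "") ++ l :: d.filter (pvHM "") := by
      conv_lhs => rw [hsplit]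
      rw [List.filter_append, List.filter_cons]
      have : pvHM "" l = true := by
        rw [pvHM_empty]
        simp only [pvP, Bool.and_eq_true] at hP
        exact hP.1
      rw [this]
      simp
    have hMl' : pvHM fp l = true := by rw [pvHM_eq]; exact hP
    have hidx : (ls.filter (pvHM "")).findIdx (pvHM fp) = ((ls.take n).filter (pvHM "")).length := by
      rw [hsplit2]
      exact pvFindIdx_append _ l _ _ hAfalse hMl'
    cases hfH : pvFirst (fun x => PySem.Str.startswith x "diff --git") d with
    | none =>
      exfalso
      have hno : d.filter (pvHM "") = [] := by
        rw [List.filter_eq_nil_iff]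
        intro x hx
        have := pvFirst_none_all _ d hfH x hx
        simp only at this
        rw [pvHM_empty, this]
        simp
      rw [getElem!_def, hidx, hsplit2, List.getElem?_append_right (by omega)] at hD
      simp only [Nat.add_sub_cancel_left, List.getElem?_cons_succ] at hD
      rw [hno] at hD
      simp only [List.getElem?_nil] at hD
      have hD' : pvHM fp "" = true := hD
      rw [pvHM_empty_str] at hD'
      cases hD'
    | some q =>
      obtain ⟨m, hl2⟩ := q
      obtain ⟨hHh, hmlen, hddrop⟩ := pvFirst_some _ d m hl2 hfH
      have hBsome : (d.filter (pvHM ""))[0]? = some hl2 := by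
        have hdsplit0 : d = d.take m ++ (hl2 :: d.drop (m + 1)) := by
          conv_lhs => rw [← List.take_append_drop m d]
          rw [hddrop]
        have hnilf : (d.take m).filter (pvHM "") = [] := by
          rw [List.filter_eq_nil_iff]
          intro x hx
          have := pvFirst_some_take _ d m hl2 hfH x hx
          simp only at this
          rw [pvHM_empty, this]
          simp
        conv_lhs => rw [hdsplit0]
        rw [List.filter_append, hnilf, List.nil_append, List.filter_cons]
        rw [pvHM_empty hl2, hHh]
        simp
      have hM : PySem.Str.isIn fp hl2 = true := by
        rw [getElem!_def, hidx, hsplit2, List.getElem?_append_right (by omega)] at hD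
        simp only [Nat.add_sub_cancel_left, List.getElem?_cons_succ] at hD
        rw [hBsome] at hD
        rw [pvHM_eq] at hD
        simp only [pvP, hHh, Bool.true_and] at hD
        exact hD
      have hdsplit : d = d.take m ++ (hl2 :: d.drop (m + 1)) := by
        conv_lhs => rw [← List.take_append_drop m d]
        rw [hddrop]
      have hlen_take2 : (d.take m).length = m := by simp; omega
      have hfilter2 : (PySem.List.enumerate d ((n : Int) + 1)).filter (fun p => PySem.Str.startswith p.2 "diff --git") =
          (((n : Int) + 1 + (m : Int)), hl2) :: ((PySem.List.enumerate (d.drop (m + 1)) ((n : Int) + 1 + (m : Int) + 1)).filter (fun p => PySem.Str.startswith p.2 "diff --git")) := by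
        conv_lhs => rw [hdsplit]
        rw [PySem.List.enumerate_append, List.filter_append, hlen_take2]
        have h1 : (PySem.List.enumerate (d.take m) ((n : Int) + 1)).filter (fun p => PySem.Str.startswith p.2 "diff --git") = [] := by
          rw [List.filter_eq_nil_iff]
          intro p hp
          have := pvFirst_some_take _ d m hl2 hfH p.2 (pvMem_enumerate_snd _ _ p hp)
          simpa using this
        rw [h1, PySem.List.enumerate_cons]
        simp only [List.filter_cons, hHh, List.nil_append]
        norm_num
      rw [hfilter2]
      have hslice : PySem.List.slice ls (some ((n : Nat) : Int)) (some ((n : Int) + 1 + (m : Int))) =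
          (ls.drop n).take (1 + m) := by
        have he : ((n : Int) + 1 + (m : Int)) = (((n + 1 + m : Nat)) : Int) := by push_cast; ring
        rw [he, PySem.List.slice_natCast]
        congr 1
        omega
      simp only [hslice, hdrop, ← hd]
      have htk : (l :: d).take (1 + m) = l :: d.take m := by
        rw [Nat.add_comm 1 m]
        simp [List.take_succ_cons]
      rw [htk]
      have htw : d.takeWhile (fun x => !pvQ fp x) = d.take m ++ hl2 :: ((d.drop (m + 1)).takeWhile (fun x => !pvQ fp x)) := by
        conv_lhs => rw [hdsplit]
        apply pvTakeWhile_frontier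
        · intro x hx
          have := pvFirst_some_take _ d m hl2 hfH x hx
          simp only at this
          simp only [pvQ, this, Bool.false_and, Bool.not_false]
        · simp only [pvQ, hHh, hM, Bool.true_and, Bool.not_true, Bool.not_false]
      simp only [List.nil_append, htw, List.isEmpty_cons, Bool.false_eq_true, if_false]
      intro heq
      have hlen := congrArg (fun s : String => s.toList.length) heq
      simp only [PySem.Str.toList_join] at hlen
      simp only [List.map_cons] at hlen
      rw [pvJoinLen, pvJoinLen] at hlen
      simp only [List.map_append, List.map_cons, List.sum_append, List.sum_cons,
        List.length_append, List.length_cons, List.length_map,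
        show ("\n" : String).toList = ['\n'] from rfl, List.length_nil, Nat.zero_add, Nat.mul_one] at hlen
      omega

-- ===== VERDICT (by name: the statement is the Claim_ definition above) =====
theorem extract_file_diff_from_full_diff_spec : Claim_unchanged_extract_file_diff_from_full_diff := by
  intro full_diff file_path _ hnd
  unfold extract_file_diff_from_full_diff extract_file_diff_from_full_diff_alt
  unfold D_extract_file_diff_from_full_diff at hnd
  exact pvMain file_path ((PySem.Str.split? full_diff "\n").getD []) (eq_false_of_ne_true hnd)

theorem extract_file_diff_from_full_diff_changed : Claim_changed_extract_file_diff_from_full_diff := by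
  unfold Claim_changed_extract_file_diff_from_full_diff
  decide

theorem extract_file_diff_from_full_diff_tight : Claim_exact_extract_file_diff_from_full_diff := by
  intro full_diff file_path _ hD
  unfold extract_file_diff_from_full_diff extract_file_diff_from_full_diff_alt
  unfold D_extract_file_diff_from_full_diff at hD
  exact pvMainTight file_path ((PySem.Str.split? full_diff "\n").getD []) hD
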